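-- pv_equiv track=rewrite | github.com/shaashwatjain/Java-Mini-Compiler | opt.py | elimDeadCode
-- ===== SOURCE A (Python) =====
-- def existslabel(lines, i):
--     if(i == 0):
--     	return 0
--     while(i>=0):
--     	if(len(lines[i].split()) == 2):
--     	    return 1
--     	i = i - 1
--     return 0
--
-- def elimDeadCode(lines):
--     flag = 0
--     newlines = []
--     for i in range(len(lines)):
--     	lines[i] = lines[i].strip("\n")
--     	outflag = 0
--     	if(existslabel(lines, i) == 1):
--
--
--     	    newlines.append(lines[i])
--     	    continue
--     	if(len(lines[i].split()) == 5 or len(lines[i].split()) == 3):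
--
--     	    lhs = lines[i].split()[0]
--
--     	    for j in range(i+1, len(lines)):
--
--     	    	if(len(lines[j].split()) == 5):
--     	    	    rhs1 = lines[j].split()[2]
--     	    	    rhs2 = lines[j].split()[4]
--     	    	    if(rhs1 == lhs or rhs2 == lhs):
--     	    	    	outflag = 1
--     	    	    	flag = 1
--     	    	    	break
--
--     	    	elif(len(lines[j].split()) == 3):
--
--     	    	    rhs = lines[j].split()[2]
--
--     	    	    if(rhs == lhs):
--     	    	    	outflag =1
--     	    	    	flag = 1
--     	    	    	break
--
--     	    	elif(len(lines[j].split()) == 4):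
--     	    	    rhs = lines[j].split()[1]
--     	    	    l1 = ""
--     	    	    l2 = ""
--     	    	    fl = 0
--
--     	    	    for x in rhs:
--     	    	    	if x in [">", "<", "=", "!"]:
--     	    	    	    fl = 1
--     	    	    	    continue
--     	    	    	if (x == "="):
--     	    	    	    continue
--     	    	    	if(fl == 0):
--     	    	    	    l1 = l1 + x
--     	    	    	if(fl == 1):
--     	    	    	    l2 = l2 + x
--
--     	    	    if(l1 == lhs or l2 == lhs):
--     	    	    	flag = 1
--     	    	    	outflag = 1
--     	    	    	break
--     	    	else:
--
--     	    	    continue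
--
--     	    if(outflag == 1):
--
--     	    	newlines.append(lines[i])
--
--
--
--     	else:
--     	    newlines.append(lines[i])
--     	    continue
--
--     return newlines
-- ===== SOURCE B (Python) =====
-- def _uses(t):
--     # variables read by a line with token list t
--     if len(t) == 5:
--         return [t[2], t[4]]
--     elif len(t) == 3:
--         return [t[2]]
--     elif len(t) == 4:
--         l1 = ""
--         l2 = ""
--         fl = 0
--         for x in t[1]:
--             if x in (">", "<", "=", "!"):
--                 fl = 1
--             elif fl == 0:
--                 l1 = l1 + x
--             else:
--                 l2 = l2 + x
--         return [l1, l2]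
--     else:
--         return []
--
-- def elimDeadCode(lines):
--     # Return-value equivalence only: A strips its argument's lines in place, B leaves the argument alone.
--     stripped = [ln.strip("\n") for ln in lines]
--     toks = [s.split() for s in stripped]
--     # forward pass: labelpref[i] = some line j <= i has exactly 2 tokens
--     labelpref = []
--     has = False
--     for t in toks:
--         has = has or len(t) == 2
--         labelpref.append(has)
--     # single backward pass: 'used' accumulates every variable read by any later line
--     used = set()
--     keeps = []
--     for i in range(len(toks) - 1, -1, -1):
--         t = toks[i]
--         if i > 0 and labelpref[i]:
--             k = True
--         elif len(t) == 5 or len(t) == 3: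
--             k = t[0] in used
--         else:
--             k = True
--         keeps.append(k)
--         used.update(_uses(t))
--     keeps.reverse()
--     return [s for s, k in zip(stripped, keeps) if k]
-- ===== Notes on version B (the rewrite author's own statement) =====
-- stated objective: faster
-- what changed: A rescans backward for labels and forward for later uses of each line's LHS (re-splitting every line each time); B pre-splits once, computes the label-prefix flags in one forward pass and decides each line in one backward pass that accumulates the set of variables used later.
import Mathlib
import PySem

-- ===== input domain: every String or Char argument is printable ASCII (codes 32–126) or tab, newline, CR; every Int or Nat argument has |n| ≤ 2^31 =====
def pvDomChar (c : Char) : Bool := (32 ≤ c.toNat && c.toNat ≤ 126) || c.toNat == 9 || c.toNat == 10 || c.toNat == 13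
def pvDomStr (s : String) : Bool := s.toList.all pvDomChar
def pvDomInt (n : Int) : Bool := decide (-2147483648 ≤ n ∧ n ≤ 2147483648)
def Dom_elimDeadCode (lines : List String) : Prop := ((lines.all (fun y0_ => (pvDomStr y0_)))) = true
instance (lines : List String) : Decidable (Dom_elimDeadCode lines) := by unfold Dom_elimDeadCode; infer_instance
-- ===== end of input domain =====

-- B replaces A's quadratic per-line forward rescans with one forward label pass and one
-- backward pass that accumulates the set of later-used variables (objective: faster).
-- Return-value equivalence only: A strips its argument's lines in place, B does not mutate.

-- ===== PORT A =====
-- A reads lines[i]/tokens[k] only at in-range indices; pyGetD with default "" is exact there.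
def twoTokAt (ls : List String) (i : Nat) : Bool :=
  (PySem.Str.split₀ (PySem.List.pyGetD ls (i : Int) "")).length == 2
def existslabelLoop (ls : List String) : Nat → Int
  | 0 => if twoTokAt ls 0 then 1 else 0
  | (i+1) => if twoTokAt ls (i+1) then 1 else existslabelLoop ls i
def existslabel (ls : List String) (i : Nat) : Int :=
  if i = 0 then 0 else existslabelLoop ls i

def charLoopA (cs : List Char) (st : List Char × List Char × Int) : List Char × List Char × Int :=
  cs.foldl (fun st x =>
    let l1 := st.1; let l2 := st.2.1; let fl := st.2.2
    if x = '>' ∨ x = '<' ∨ x = '=' ∨ x = '!' then (l1, l2, 1)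
    else if x = '=' then (l1, l2, fl)
    else (if fl = 0 then l1 ++ [x] else l1, if fl = 1 then l2 ++ [x] else l2, fl)) st
def innerLoop (ls : List String) (lhs : String) (n : Nat) : Nat → Int → Int × Int
  | j, flag =>
    if _h : j < n then
      let tj := PySem.Str.split₀ (PySem.List.pyGetD ls (j : Int) "")
      if tj.length = 5 then
        let rhs1 := PySem.List.pyGetD tj (2 : Int) ""
        let rhs2 := PySem.List.pyGetD tj (4 : Int) ""
        if rhs1 = lhs ∨ rhs2 = lhs then (1, 1) else innerLoop ls lhs n (j+1) flag
      else if tj.length = 3 then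
        let rhs := PySem.List.pyGetD tj (2 : Int) ""
        if rhs = lhs then (1, 1) else innerLoop ls lhs n (j+1) flag
      else if tj.length = 4 then
        let rhs := PySem.List.pyGetD tj (1 : Int) ""
        let r := charLoopA rhs.toList ([], [], 0)
        if String.ofList r.1 = lhs ∨ String.ofList r.2.1 = lhs then (1, 1)
        else innerLoop ls lhs n (j+1) flag
      else innerLoop ls lhs n (j+1) flag
    else (0, flag)
termination_by j _ => n - j

def elimLoop (n : Nat) : Nat → List String → List String → Int → List String
  | i, cur, newl, flag =>
    if _h : i < n then
      let li := PySem.Str.stripChars (PySem.List.pyGetD cur (i : Int) "") "\n"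
      let cur' := cur.set i li
      if existslabel cur' i = 1 then
        elimLoop n (i+1) cur' (newl ++ [li]) flag
      else if (PySem.Str.split₀ li).length = 5 ∨ (PySem.Str.split₀ li).length = 3 then
        let lhs := PySem.List.pyGetD (PySem.Str.split₀ li) (0 : Int) ""
        let r := innerLoop cur' lhs n (i+1) flag
        if r.1 = 1 then elimLoop n (i+1) cur' (newl ++ [li]) r.2
        else elimLoop n (i+1) cur' newl r.2
      else
        elimLoop n (i+1) cur' (newl ++ [li]) flag
    else newl
termination_by i _ _ _ => n - i

def elimDeadCode (lines : List String) : List String :=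
  elimLoop lines.length 0 lines [] 0

-- ===== PORT B =====
def charLoopB (cs : List Char) : List Char × List Char × Int :=
  cs.foldl (fun st x =>
    let l1 := st.1; let l2 := st.2.1; let fl := st.2.2
    if x = '>' ∨ x = '<' ∨ x = '=' ∨ x = '!' then (l1, l2, 1)
    else if fl = 0 then (l1 ++ [x], l2, fl)
    else (l1, l2 ++ [x], fl)) ([], [], 0)

-- _uses(t) of Source B
def usesB (t : List String) : List String :=
  if t.length = 5 then [PySem.List.pyGetD t (2:Int) "", PySem.List.pyGetD t (4:Int) ""]
  else if t.length = 3 then [PySem.List.pyGetD t (2:Int) ""]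
  else if t.length = 4 then
    let r := charLoopB (PySem.List.pyGetD t (1:Int) "").toList
    [String.ofList r.1, String.ofList r.2.1]
  else []

-- for i in range(len(toks)-1, -1, -1): decide keep, then used.update(_uses(t))
def backLoop (toks : List (List String)) (lp : List Bool) : Nat → PySem.Set String → List Bool → List Bool
  | 0, _, keeps => keeps
  | (i+1), used, keeps =>
    let t := toks.getD i []
    let k : Bool :=
      if 0 < i ∧ lp.getD i false then true
      else if t.length = 5 ∨ t.length = 3 then
        PySem.Set.contains used (PySem.List.pyGetD t (0:Int) "")
      else true
    backLoop toks lp i (PySem.Set.update used (usesB t)) (keeps ++ [k])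

def elimDeadCode_alt (lines : List String) : List String :=
  let stripped := lines.map (fun s => PySem.Str.stripChars s "\n")
  let toks := stripped.map PySem.Str.split₀
  let lp := (toks.foldl (fun (st : List Bool × Bool) t =>
      let has := st.2 || (t.length == 2); (st.1 ++ [has], has)) ([], false)).1
  let keeps := (backLoop toks lp toks.length PySem.Set.empty []).reverse
  ((stripped.zip keeps).filter (fun p => p.2)).map (fun p => p.1)

-- ===== PRECONDITION & SPEC =====
def Spec_elimDeadCode (lines : List String) (out : List String) : Prop := out = elimDeadCode_alt lines
instance (lines : List String) (out : List String) : Decidable (Spec_elimDeadCode lines out) := by unfold Spec_elimDeadCode; infer_instance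

-- ===== CLAIM (what is proved, stated in full; the proofs are below) =====
def Claim_equal_elimDeadCode : Prop := ∀ (lines : List String), Dom_elimDeadCode lines → Spec_elimDeadCode lines (elimDeadCode lines)

-- ===== LEMMAS AND PROOFS =====

-- common specification both ports are reduced to
def stripS (s : String) : String := PySem.Str.stripChars s "\n"
def tk (lines : List String) (j : Nat) : List String := PySem.Str.split₀ (lines.getD j "")
def keepSpec (lines : List String) (i : Nat) : Bool :=
  if 0 < i ∧ ∃ j < i + 1, (tk lines j).length = 2 then true
  else if (tk lines i).length = 5 ∨ (tk lines i).length = 3 then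
    decide (∃ j < lines.length, i + 1 ≤ j ∧
      PySem.List.pyGetD (tk lines i) (0:Int) "" ∈ usesB (tk lines j))
  else true

def specFrom (lines : List String) (i : Nat) : List String :=
  if _h : i < lines.length then
    (if keepSpec lines i then [stripS (lines.getD i "")] else []) ++ specFrom lines (i+1)
  else []
termination_by lines.length - i

-- str.split() is unchanged by stripping the whitespace character '\n' from the ends
theorem go_nil (cur : List Char) (acc : List (List Char)) :
    PySem.Chars.split₀.go [] cur acc =
      if cur.isEmpty then acc.reverse else (cur.reverse :: acc).reverse := rfl

theorem go_cons (c : Char) (s cur : List Char) (acc : List (List Char)) :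
    PySem.Chars.split₀.go (c :: s) cur acc =
      if PySem.Chars.isspace c then
        (if cur.isEmpty then PySem.Chars.split₀.go s [] acc
         else PySem.Chars.split₀.go s [] (cur.reverse :: acc))
      else PySem.Chars.split₀.go s (c :: cur) acc := rfl

theorem go_ws_nil : ∀ (ws : List Char) (acc : List (List Char)),
    (∀ c ∈ ws, PySem.Chars.isspace c = true) →
    PySem.Chars.split₀.go ws [] acc = acc.reverse := by
  intro ws
  induction ws with
  | nil => intro acc _; rfl
  | cons c s ih =>
    intro acc h
    rw [go_cons]
    simp [h c (by simp)]
    exact ih acc (fun c hc => h c (by simp [hc]))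

theorem go_append_ws (ws : List Char) (hws : ∀ c ∈ ws, PySem.Chars.isspace c = true) :
    ∀ (s cur : List Char) (acc : List (List Char)),
    PySem.Chars.split₀.go (s ++ ws) cur acc = PySem.Chars.split₀.go s cur acc := by
  intro s
  induction s with
  | nil =>
    intro cur acc
    simp only [List.nil_append, go_nil]
    cases ws with
    | nil => rfl
    | cons w ws' =>
      rw [go_cons]
      have hw := hws w (by simp)
      simp only [hw, if_true]
      have hrest : ∀ c ∈ ws', PySem.Chars.isspace c = true := fun c hc => hws c (by simp [hc])
      by_cases hc : cur.isEmpty = true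
      · rw [go_ws_nil ws' acc hrest]; simp [hc]
      · rw [go_ws_nil ws' (cur.reverse :: acc) hrest]; simp [hc]
  | cons c s ih =>
    intro cur acc
    rw [List.cons_append, go_cons, go_cons]
    by_cases hc : PySem.Chars.isspace c <;> simp [hc, ih]

theorem go_ws_prefix (ws : List Char) (hws : ∀ c ∈ ws, PySem.Chars.isspace c = true) :
    ∀ (s : List Char) (acc : List (List Char)),
    PySem.Chars.split₀.go (ws ++ s) [] acc = PySem.Chars.split₀.go s [] acc := by
  induction ws with
  | nil => intro s acc; rfl
  | cons w ws' ih =>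
    intro s acc
    rw [List.cons_append, go_cons]
    simp [hws w (by simp)]
    exact ih (fun c hc => hws c (by simp [hc])) s acc

theorem chars_split₀_strip (cs : List Char) :
    PySem.Chars.split₀ (PySem.Chars.stripChars cs ['\n']) = PySem.Chars.split₀ cs := by
  unfold PySem.Chars.stripChars PySem.Chars.split₀
  set p := fun c => List.contains ['\n'] c with hp
  have hsp : ∀ c, p c = true → PySem.Chars.isspace c = true := by
    intro c hc
    simp [hp] at hc
    subst hc; decide
  set t := List.dropWhile p cs with ht
  have h1 : cs = List.takeWhile p cs ++ t := (List.takeWhile_append_dropWhile).symm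
  have h2 : t = (List.dropWhile p t.reverse).reverse ++ (List.takeWhile p t.reverse).reverse := by
    conv_lhs => rw [← List.reverse_reverse t, ← List.takeWhile_append_dropWhile (p := p) (l := t.reverse)]
    rw [List.reverse_append]
  show PySem.Chars.split₀.go (List.dropWhile p (List.dropWhile p cs).reverse).reverse [] [] =
      PySem.Chars.split₀.go cs [] []
  rw [← ht]
  conv_rhs => rw [h1]
  rw [go_ws_prefix _ (fun c hc => hsp c (List.mem_takeWhile_imp hc))]
  conv_rhs => rw [h2]
  rw [go_append_ws _ (fun c hc => hsp c (List.mem_takeWhile_imp (by simpa using hc)))]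

theorem split₀_strip (s : String) :
    PySem.Str.split₀ (stripS s) = PySem.Str.split₀ s := by
  show PySem.Str.split₀ (PySem.Str.stripChars s "\n") = PySem.Str.split₀ s
  simp only [PySem.Str.split₀]
  rw [PySem.Str.toList_stripChars]
  have : ("\n" : String).toList = ['\n'] := rfl
  rw [this, chars_split₀_strip]


-- lists whose lines tokenise like `lines` (A's partially stripped list does)
def SplitEq (ls lines : List String) : Prop :=
  ls.length = lines.length ∧ ∀ j, PySem.Str.split₀ (ls.getD j "") = tk lines j

theorem splitEq_mix (lines : List String) (k : Nat) (hk : k ≤ lines.length) :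
    SplitEq ((lines.map stripS).take k ++ lines.drop k) lines := by
  constructor
  · simp; omega
  · intro j
    unfold tk
    rcases Nat.lt_or_ge j k with hj | hj
    · have h1 : ((lines.map stripS).take k ++ lines.drop k).getD j "" = stripS (lines.getD j "") := by
        rw [List.getD_eq_getElem?_getD, List.getElem?_append_left (by simp; omega)]
        rw [List.getElem?_take_of_lt hj, List.getElem?_map]
        rw [List.getD_eq_getElem?_getD]
        cases lines[j]? <;> simp [stripS]
        decide
      rw [h1, split₀_strip]
    · have h1 : ((lines.map stripS).take k ++ lines.drop k).getD j "" = lines.getD j "" := by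
        rw [List.getD_eq_getElem?_getD, List.getElem?_append_right (by simp; omega)]
        simp [List.getElem?_drop]
        have he : k + (j - min k lines.length) = j := by omega
        rw [he]
      rw [h1]

theorem twoTokAt_eq (ls lines : List String) (h : SplitEq ls lines) (i : Nat) :
    twoTokAt ls i = ((tk lines i).length == 2) := by
  unfold twoTokAt
  rw [PySem.List.pyGetD_natCast, h.2 i]

theorem existslabelLoop_eq (ls lines : List String) (h : SplitEq ls lines) :
    ∀ i, existslabelLoop ls i = if ∃ j < i + 1, (tk lines j).length = 2 then 1 else 0 := by
  intro i
  induction i with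
  | zero =>
    simp only [existslabelLoop, twoTokAt_eq ls lines h]
    by_cases h2 : (tk lines 0).length = 2
    · simp [h2]
    · simp only [beq_iff_eq]
      rw [if_neg h2, if_neg]
      push Not
      intro j hj
      interval_cases j
      · exact h2
  | succ i ih =>
    simp only [existslabelLoop, twoTokAt_eq ls lines h, ih, beq_iff_eq]
    by_cases h2 : (tk lines (i+1)).length = 2
    · rw [if_pos h2, if_pos ⟨i+1, by omega, h2⟩]
    · rw [if_neg h2]
      by_cases h3 : ∃ j < i + 1, (tk lines j).length = 2
      · obtain ⟨j, hj, hpj⟩ := h3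
        rw [if_pos ⟨j, hj, hpj⟩, if_pos ⟨j, by omega, hpj⟩]
      · rw [if_neg h3, if_neg]
        push Not at h3 ⊢
        intro j hj
        rcases Nat.lt_or_ge j (i+1) with hj' | hj'
        · exact h3 j hj'
        · have : j = i + 1 := by omega
          rw [this]; exact h2

theorem existslabel_eq (ls lines : List String) (h : SplitEq ls lines) (i : Nat) :
    existslabel ls i = if 0 < i ∧ ∃ j < i + 1, (tk lines j).length = 2 then 1 else 0 := by
  unfold existslabel
  by_cases hi : i = 0
  · subst hi; simp
  · rw [if_neg hi, existslabelLoop_eq ls lines h]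
    by_cases h2 : ∃ j < i + 1, (tk lines j).length = 2
    · rw [if_pos h2, if_pos ⟨by omega, h2⟩]
    · rw [if_neg h2, if_neg (fun hc => h2 hc.2)]

theorem charLoopA_eq_B (cs : List Char) : charLoopA cs ([], [], 0) = charLoopB cs := by
  unfold charLoopA charLoopB
  suffices h : ∀ (cs : List Char) (l1 l2 : List Char) (fl : Int), fl = 0 ∨ fl = 1 →
      cs.foldl (fun st x =>
        if x = '>' ∨ x = '<' ∨ x = '=' ∨ x = '!' then (st.1, st.2.1, (1:Int))
        else if x = '=' then (st.1, st.2.1, st.2.2)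
        else (if st.2.2 = 0 then st.1 ++ [x] else st.1, if st.2.2 = 1 then st.2.1 ++ [x] else st.2.1, st.2.2)) (l1, l2, fl) =
      cs.foldl (fun st x =>
        if x = '>' ∨ x = '<' ∨ x = '=' ∨ x = '!' then (st.1, st.2.1, (1:Int))
        else if st.2.2 = 0 then (st.1 ++ [x], st.2.1, st.2.2)
        else (st.1, st.2.1 ++ [x], st.2.2)) (l1, l2, fl) by
    exact h cs [] [] 0 (Or.inl rfl)
  intro cs
  induction cs with
  | nil => intros; rfl
  | cons x rest ih =>
    intro l1 l2 fl hfl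
    simp only [List.foldl_cons]
    by_cases hx : x = '>' ∨ x = '<' ∨ x = '=' ∨ x = '!'
    · rw [if_pos hx, if_pos hx]
      exact ih l1 l2 1 (Or.inr rfl)
    · rw [if_neg hx, if_neg hx]
      have hne : ¬ (x = '=') := by tauto
      rw [if_neg hne]
      rcases hfl with h0 | h1
      · subst h0
        norm_num
        exact ih _ _ _ (Or.inl rfl)
      · subst h1
        norm_num
        exact ih _ _ _ (Or.inr rfl)

-- splitting the found-now-or-later existential
theorem ex_split (P : Nat → Prop) (j n : Nat) (hj : j < n) :
    (∃ x < n, j ≤ x ∧ P x) ↔ (P j ∨ ∃ x < n, j + 1 ≤ x ∧ P x) := by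
  constructor
  · rintro ⟨x, hx, hjx, hp⟩
    rcases Nat.eq_or_lt_of_le hjx with he | hl
    · exact Or.inl (he ▸ hp)
    · exact Or.inr ⟨x, hx, hl, hp⟩
  · rintro (hp | ⟨x, hx, hjx, hp⟩)
    · exact ⟨j, hj, le_refl j, hp⟩
    · exact ⟨x, hx, by omega, hp⟩

theorem if_io {P Q : Prop} [Decidable P] [Decidable Q] (h : P ↔ Q) :
    (if P then (1:Int) else 0) = if Q then 1 else 0 := if_congr h rfl rfl

theorem innerLoop_eq (ls lines : List String) (h : SplitEq ls lines) (lhs : String) :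
    ∀ (j : Nat) (flag : Int),
    (innerLoop ls lhs lines.length j flag).1 =
      if ∃ j' < lines.length, j ≤ j' ∧ lhs ∈ usesB (tk lines j') then 1 else 0 := by
  intro j
  induction hd : lines.length - j using Nat.strong_induction_on generalizing j with
  | _ d ih =>
  intro flag
  by_cases hj : j < lines.length
  · rw [innerLoop, dif_pos hj]
    have htj : PySem.Str.split₀ (PySem.List.pyGetD ls (j : Int) "") = tk lines j := by
      rw [PySem.List.pyGetD_natCast]; exact h.2 j
    rw [htj]
    have hrec : ∀ flag', (innerLoop ls lhs lines.length (j+1) flag').1 =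
        if ∃ j' < lines.length, j + 1 ≤ j' ∧ lhs ∈ usesB (tk lines j') then 1 else 0 :=
      fun flag' => ih (lines.length - (j+1)) (by omega) (j+1) rfl flag'
    rw [if_io (ex_split (fun x => lhs ∈ usesB (tk lines x)) j lines.length hj)]
    beta_reduce
    have step : ∀ (cond : Prop) [Decidable cond], (cond ↔ lhs ∈ usesB (tk lines j)) →
        (if cond then ((1:Int),(1:Int)) else innerLoop ls lhs lines.length (j+1) flag).1 =
        if lhs ∈ usesB (tk lines j) ∨ (∃ j' < lines.length, j + 1 ≤ j' ∧ lhs ∈ usesB (tk lines j'))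
          then 1 else 0 := by
      intro cond _ hc
      by_cases hcc : cond
      · rw [if_pos hcc, if_pos (Or.inl (hc.mp hcc))]
      · rw [if_neg hcc, hrec]
        have hnow : ¬ lhs ∈ usesB (tk lines j) := fun hx => hcc (hc.mpr hx)
        by_cases hl : ∃ j' < lines.length, j + 1 ≤ j' ∧ lhs ∈ usesB (tk lines j')
        · rw [if_pos hl, if_pos (Or.inr hl)]
        · rw [if_neg hl, if_neg (by rintro (hc|hc); exacts [hnow hc, hl hc])]
    by_cases h5 : (tk lines j).length = 5
    · rw [if_pos h5]
      have hiff : (PySem.List.pyGetD (tk lines j) (2:Int) "" = lhs ∨ PySem.List.pyGetD (tk lines j) (4:Int) "" = lhs)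
          ↔ lhs ∈ usesB (tk lines j) := by
        rw [usesB, if_pos h5]
        simp only [List.mem_cons, List.not_mem_nil, or_false]
        constructor
        · rintro (hm | hm)
          · exact Or.inl hm.symm
          · exact Or.inr hm.symm
        · rintro (hm | hm)
          · exact Or.inl hm.symm
          · exact Or.inr hm.symm
      exact step _ hiff
    · rw [if_neg h5]
      by_cases h3 : (tk lines j).length = 3
      · rw [if_pos h3]
        have hiff : (PySem.List.pyGetD (tk lines j) (2:Int) "" = lhs) ↔ lhs ∈ usesB (tk lines j) := by
          rw [usesB, if_neg (by omega), if_pos h3]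
          simp only [List.mem_cons, List.not_mem_nil, or_false]
          exact ⟨fun hm => hm.symm, fun hm => hm.symm⟩
        exact step _ hiff
      · rw [if_neg h3]
        by_cases h4 : (tk lines j).length = 4
        · rw [if_pos h4]
          simp only [charLoopA_eq_B]
          have hiff : (String.ofList (charLoopB (PySem.List.pyGetD (tk lines j) (1:Int) "").toList).1 = lhs ∨
              String.ofList (charLoopB (PySem.List.pyGetD (tk lines j) (1:Int) "").toList).2.1 = lhs)
              ↔ lhs ∈ usesB (tk lines j) := by
            rw [usesB, if_neg (by omega), if_neg (by omega), if_pos h4]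
            simp only [List.mem_cons, List.not_mem_nil, or_false]
            constructor
            · rintro (hm | hm)
              · exact Or.inl hm.symm
              · exact Or.inr hm.symm
            · rintro (hm | hm)
              · exact Or.inl hm.symm
              · exact Or.inr hm.symm
          exact step _ hiff
        · rw [if_neg h4]
          rw [hrec]
          have hu : usesB (tk lines j) = [] := by
            rw [usesB, if_neg (by omega), if_neg (by omega), if_neg (by omega)]
          by_cases hl : ∃ j' < lines.length, j + 1 ≤ j' ∧ lhs ∈ usesB (tk lines j')
          · rw [if_pos hl, if_pos (Or.inr hl)]
          · rw [if_neg hl, if_neg (fun hc => hc.elim (fun h0 => by rw [hu] at h0; simp at h0) hl)]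
  · rw [innerLoop, dif_neg hj]
    rw [if_neg (by rintro ⟨x, hx, hjx, _⟩; omega)]

theorem elimLoop_eq (lines : List String) :
    ∀ (i : Nat) (newl : List String) (flag : Int),
    elimLoop lines.length i ((lines.map stripS).take i ++ lines.drop i) newl flag =
      newl ++ specFrom lines i := by
  intro i
  induction hd : lines.length - i using Nat.strong_induction_on generalizing i with
  | _ d ih =>
  intro newl flag
  by_cases hi : i < lines.length
  case neg =>
    rw [elimLoop, dif_neg hi, specFrom, dif_neg hi, List.append_nil]
  case pos =>
  have hstrlen : (lines.map stripS).length = lines.length := by simp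
  have htklen : ((lines.map stripS).take i).length = i := by simp; omega
  have f1 : PySem.List.pyGetD ((lines.map stripS).take i ++ lines.drop i) (i : Int) ""
      = lines.getD i "" := by
    rw [PySem.List.pyGetD_natCast, List.getD_eq_getElem?_getD,
        List.getElem?_append_right (by omega), htklen]
    simp [List.getElem?_drop, List.getD_eq_getElem?_getD]
  have f2 : ((lines.map stripS).take i ++ lines.drop i).set i (stripS (lines.getD i ""))
      = (lines.map stripS).take (i+1) ++ lines.drop (i+1) := by
    rw [List.set_append]
    rw [if_neg (by omega), htklen, Nat.sub_self]
    rw [List.drop_eq_getElem_cons hi]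
    show (lines.map stripS).take i ++ stripS (lines.getD i "") :: lines.drop (i + 1) = _
    rw [List.take_add_one]
    have : (lines.map stripS)[i]?.toList = [stripS (lines.getD i "")] := by
      simp [List.getElem?_map, List.getD_eq_getElem?_getD, List.getElem?_eq_getElem hi]
    rw [this, List.append_assoc, List.singleton_append]
  have hse : SplitEq ((lines.map stripS).take (i+1) ++ lines.drop (i+1)) lines :=
    splitEq_mix lines (i+1) (by omega)
  have f4 : PySem.Str.split₀ (stripS (lines.getD i "")) = tk lines i := by
    rw [split₀_strip]; rfl
  have hSS : ∀ s, PySem.Str.stripChars s "\n" = stripS s := fun _ => rfl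
  rw [elimLoop]
  simp only [dif_pos hi, hSS, f1, f2]
  rw [existslabel_eq _ lines hse i]
  rw [specFrom, dif_pos hi, keepSpec]
  by_cases hP1 : 0 < i ∧ ∃ j < i + 1, (tk lines j).length = 2
  · rw [if_pos hP1, if_pos hP1, if_pos rfl]
    rw [ih (lines.length - (i+1)) (by omega) (i+1) rfl, List.append_assoc]
    rfl
  · rw [if_neg hP1, if_neg hP1, if_neg (by norm_num)]
    rw [f4]
    by_cases hP2 : (tk lines i).length = 5 ∨ (tk lines i).length = 3
    · rw [if_pos hP2, if_pos hP2]
      rw [innerLoop_eq _ lines hse _ (i+1) flag]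
      by_cases hP3 : ∃ j < lines.length, i + 1 ≤ j ∧
          PySem.List.pyGetD (tk lines i) (0:Int) "" ∈ usesB (tk lines j)
      · rw [if_pos hP3, if_pos rfl, if_pos (by exact decide_eq_true hP3)]
        rw [ih (lines.length - (i+1)) (by omega) (i+1) rfl, List.append_assoc]
      · rw [if_neg hP3, if_neg (by norm_num), if_neg (by simpa using hP3)]
        rw [ih (lines.length - (i+1)) (by omega) (i+1) rfl]
        rfl
    · rw [if_neg hP2, if_neg hP2, if_pos rfl]
      rw [ih (lines.length - (i+1)) (by omega) (i+1) rfl, List.append_assoc]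

theorem portA_eq_spec (lines : List String) : elimDeadCode lines = specFrom lines 0 := by
  have h0 : (lines.map stripS).take 0 ++ lines.drop 0 = lines := by simp
  have h := elimLoop_eq lines 0 [] 0
  rw [h0] at h
  rw [elimDeadCode, h, List.nil_append]

theorem mem_update (xs : List String) : ∀ (s : PySem.Set String) (v : String),
    v ∈ PySem.Set.update s xs ↔ v ∈ s ∨ v ∈ xs := by
  induction xs with
  | nil => intro s v; simp [PySem.Set.update]
  | cons x xs ih =>
    intro s v
    show v ∈ PySem.Set.update (s.add x) xs ↔ _
    rw [ih, PySem.Set.mem_add]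
    simp [or_assoc, or_comm, or_left_comm]

theorem set_contains_mem (s : PySem.Set String) (v : String) :
    PySem.Set.contains s v = decide (v ∈ s) := by
  simp [PySem.Set.contains]

theorem lpFold : ∀ (ts : List (List String)) (acc : List Bool) (has : Bool),
    (ts.foldl (fun (st : List Bool × Bool) t =>
      let has := st.2 || (t.length == 2); (st.1 ++ [has], has)) (acc, has)).1 =
    acc ++ (List.range ts.length).map
      (fun k => has || (ts.take (k+1)).any (fun t => t.length == 2)) := by
  intro ts
  induction ts with
  | nil => intro acc has; simp
  | cons t ts ih =>
    intro acc has
    rw [List.foldl_cons, ih]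
    simp only [List.length_cons, List.range_succ_eq_map, List.map_cons, List.map_map]
    rw [List.append_assoc, List.singleton_append]
    simp [Function.comp_def, Bool.or_assoc]

theorem backLoop_eq (lines : List String) (toks : List (List String)) (lp : List Bool)
    (htoks : ∀ j, j < lines.length → toks.getD j [] = tk lines j)
    (hlp : ∀ i, i < lines.length → (lp.getD i false = true ↔ ∃ j < i + 1, (tk lines j).length = 2)) :
    ∀ (i : Nat), i ≤ lines.length → ∀ (used : PySem.Set String) (keeps : List Bool),
    (∀ v : String, PySem.Set.contains used v =
      decide (∃ j < lines.length, i ≤ j ∧ v ∈ usesB (tk lines j))) →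
    backLoop toks lp i used keeps =
      keeps ++ (List.range i).reverse.map (fun k => keepSpec lines k) := by
  intro i
  induction i with
  | zero => intro _ used keeps _; simp [backLoop]
  | succ i ih =>
    intro hle used keeps hused
    rw [backLoop]
    have hi : i < lines.length := by omega
    have ht : toks.getD i [] = tk lines i := htoks i hi
    have hk : (if 0 < i ∧ lp.getD i false then true
        else if (toks.getD i []).length = 5 ∨ (toks.getD i []).length = 3 then
          PySem.Set.contains used (PySem.List.pyGetD (toks.getD i []) (0:Int) "")
        else true) = keepSpec lines i := by
      rw [ht, keepSpec]
      by_cases h1 : 0 < i ∧ ∃ j < i + 1, (tk lines j).length = 2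
      · rw [if_pos ⟨h1.1, (hlp i hi).mpr h1.2⟩, if_pos h1]
      · rw [if_neg (fun hc => h1 ⟨hc.1, (hlp i hi).mp hc.2⟩), if_neg h1]
        by_cases h2 : (tk lines i).length = 5 ∨ (tk lines i).length = 3
        · rw [if_pos h2, if_pos h2, hused]
        · rw [if_neg h2, if_neg h2]
    rw [hk]
    have hused' : ∀ v : String, PySem.Set.contains (PySem.Set.update used (usesB (toks.getD i []))) v =
        decide (∃ j < lines.length, i ≤ j ∧ v ∈ usesB (tk lines j)) := by
      intro v
      rw [set_contains_mem]
      apply decide_eq_decide.mpr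
      rw [mem_update, ht]
      have h2 : v ∈ used ↔ ∃ j < lines.length, i + 1 ≤ j ∧ v ∈ usesB (tk lines j) := by
        have h3 := hused v
        rw [set_contains_mem] at h3
        exact decide_eq_decide.mp h3
      rw [h2]
      constructor
      · rintro (⟨j, hj, hij, hm⟩ | hm)
        · exact ⟨j, hj, by omega, hm⟩
        · exact ⟨i, hi, le_refl i, hm⟩
      · rintro ⟨j, hj, hij, hm⟩
        rcases Nat.eq_or_lt_of_le hij with he | hl
        · exact Or.inr (he ▸ hm)
        · exact Or.inl ⟨j, hj, hl, hm⟩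
    rw [ih (by omega) _ _ hused']
    rw [List.range_succ, List.reverse_append, List.map_append]
    simp

theorem zipFilter_eq (lines : List String) :
    ∀ (i : Nat), i ≤ lines.length →
    ((((lines.map stripS).drop i).zip
        ((List.range' i (lines.length - i)).map (fun k => keepSpec lines k))).filter
      (fun p => p.2)).map (fun p => p.1) = specFrom lines i := by
  intro i
  induction hd : lines.length - i using Nat.strong_induction_on generalizing i with
  | _ d ih =>
  intro hle
  by_cases hi : i < lines.length
  · have hmlen : (lines.map stripS).length = lines.length := by simp
    have hdrop : (lines.map stripS).drop i = stripS (lines.getD i "") :: (lines.map stripS).drop (i+1) := by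
      rw [List.drop_eq_getElem_cons (by omega)]
      congr 1
      rw [List.getElem_map]
      simp [List.getD_eq_getElem?_getD, List.getElem?_eq_getElem hi]
    have hrng : d = (lines.length - (i+1)) + 1 := by omega
    rw [hdrop, hrng, List.range'_succ, List.map_cons, List.zip_cons_cons]
    rw [specFrom, dif_pos hi]
    by_cases hk : keepSpec lines i
    · rw [List.filter_cons_of_pos (by simpa using hk), List.map_cons]
      rw [ih (lines.length - (i+1)) (by omega) (i+1) rfl (by omega)]
      rw [hk, if_pos rfl]
      rfl
    · rw [List.filter_cons_of_neg (by simpa using hk)]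
      rw [ih (lines.length - (i+1)) (by omega) (i+1) rfl (by omega)]
      rw [Bool.not_eq_true] at hk
      rw [hk, if_neg (by simp), List.nil_append]
  · have h1 : i = lines.length := by omega
    subst h1
    have h2 : d = 0 := by omega
    subst h2
    simp [specFrom]

theorem portB_eq_spec (lines : List String) : elimDeadCode_alt lines = specFrom lines 0 := by
  rw [elimDeadCode_alt]
  have hstrip : lines.map (fun s => PySem.Str.stripChars s "\n") = lines.map stripS := rfl
  rw [hstrip]
  set toks := (lines.map stripS).map PySem.Str.split₀ with htoksdef
  have htlen : toks.length = lines.length := by simp [htoksdef]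
  have htoks : ∀ j, j < lines.length → toks.getD j [] = tk lines j := by
    intro j hj
    rw [htoksdef, List.getD_eq_getElem?_getD, List.getElem?_eq_getElem (by simp; omega)]
    rw [List.getElem_map, List.getElem_map]
    have : PySem.Str.split₀ (stripS lines[j]) = PySem.Str.split₀ lines[j] := split₀_strip _
    rw [this, tk, List.getD_eq_getElem?_getD, List.getElem?_eq_getElem hj]
    rfl
  have hlpval : (toks.foldl (fun (st : List Bool × Bool) t =>
      let has := st.2 || (t.length == 2); (st.1 ++ [has], has)) ([], false)).1 =
      (List.range toks.length).map
        (fun k => false || (toks.take (k+1)).any (fun t => t.length == 2)) := by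
    rw [lpFold]
    rfl
  set lp := (toks.foldl (fun (st : List Bool × Bool) t =>
      let has := st.2 || (t.length == 2); (st.1 ++ [has], has)) ([], false)).1 with hlpdef
  have hlp : ∀ i, i < lines.length →
      (lp.getD i false = true ↔ ∃ j < i + 1, (tk lines j).length = 2) := by
    intro i hi
    rw [hlpval, List.getD_eq_getElem?_getD, List.getElem?_map,
      List.getElem?_range (by omega)]
    simp only [Option.map_some, Option.getD_some, Bool.false_or, List.any_eq_true]
    constructor
    · rintro ⟨t, htm, hp⟩
      rw [List.mem_take_iff_getElem] at htm
      obtain ⟨m, hm, hteq⟩ := htm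
      refine ⟨m, by omega, ?_⟩
      have : toks.getD m [] = t := by
        rw [List.getD_eq_getElem?_getD, List.getElem?_eq_getElem (by omega), hteq]
        rfl
      rw [← htoks m (by omega), this]
      simpa using hp
    · rintro ⟨j, hj, hp⟩
      refine ⟨toks.take (i+1) |>.get ⟨j, by rw [List.length_take]; omega⟩, List.get_mem _ _, ?_⟩
      rw [List.get_eq_getElem, List.getElem_take]
      have : toks[j] = tk lines j := by
        rw [← htoks j (by omega), List.getD_eq_getElem?_getD, List.getElem?_eq_getElem (by omega)]
        rfl
      rw [this]
      simpa using hp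
  have hused0 : ∀ v : String, PySem.Set.contains PySem.Set.empty v =
      decide (∃ j < lines.length, lines.length ≤ j ∧ v ∈ usesB (tk lines j)) := by
    intro v
    rw [decide_eq_false (by rintro ⟨j, hj, hij, _⟩; omega)]
    rfl
  rw [htlen, backLoop_eq lines toks lp htoks hlp lines.length (le_refl _) _ [] hused0]
  rw [List.nil_append, ← List.map_reverse, List.reverse_reverse]
  have : List.range lines.length = List.range' 0 lines.length := List.range_eq_range'
  rw [this]
  have h0 := zipFilter_eq lines 0 (by omega)
  rw [List.drop_zero, Nat.sub_zero] at h0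
  exact h0

-- ===== VERDICT (by name: the statement is the Claim_ definition above) =====
theorem elimDeadCode_spec : Claim_equal_elimDeadCode := by
  intro lines _
  show elimDeadCode lines = elimDeadCode_alt lines
  rw [portA_eq_spec, portB_eq_spec]
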